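-- pv_equiv track=rewrite | github.com/rheeger/senpi-skills | mantis/scripts/mantis-scanner.py | is_erratic_history
-- ===== SOURCE A (Python) =====
-- ERRATIC_REVERSAL_THRESHOLD = 5
--
-- def is_erratic_history(rank_history, exclude_last=False):
--     ranks = rank_history[:-1] if exclude_last else rank_history
--     ranks = [r for r in ranks if r is not None]
--     if len(ranks) < 3:
--         return False
--     reversals = sum(1 for i in range(1, len(ranks) - 1)
--                     if (ranks[i] > ranks[i-1] and ranks[i] > ranks[i+1]) or
--                        (ranks[i] < ranks[i-1] and ranks[i] < ranks[i+1]))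
--     return reversals >= ERRATIC_REVERSAL_THRESHOLD
-- ===== SOURCE B (Python) =====
-- ERRATIC_REVERSAL_THRESHOLD = 5
--
-- def is_erratic_history(rank_history, exclude_last=False):
--     ranks = rank_history[:-1] if exclude_last else rank_history
--     ranks = [r for r in ranks if r is not None]
--     signs = [1 if b > a else -1 if b < a else 0 for a, b in zip(ranks, ranks[1:])]
--     flips = sum(1 for s, t in zip(signs, signs[1:]) if s * t < 0)
--     return flips >= ERRATIC_REVERSAL_THRESHOLD
-- ===== Notes on version B (the rewrite author's own statement) =====
-- stated objective: alternative
-- what changed: Replaces the window-of-3 index scan counting strict peaks/valleys with a derived sequence of directional signs of consecutive differences followed by a count of adjacent opposite-sign pairs; the short-input guard becomes unnecessary.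
import Mathlib
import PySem

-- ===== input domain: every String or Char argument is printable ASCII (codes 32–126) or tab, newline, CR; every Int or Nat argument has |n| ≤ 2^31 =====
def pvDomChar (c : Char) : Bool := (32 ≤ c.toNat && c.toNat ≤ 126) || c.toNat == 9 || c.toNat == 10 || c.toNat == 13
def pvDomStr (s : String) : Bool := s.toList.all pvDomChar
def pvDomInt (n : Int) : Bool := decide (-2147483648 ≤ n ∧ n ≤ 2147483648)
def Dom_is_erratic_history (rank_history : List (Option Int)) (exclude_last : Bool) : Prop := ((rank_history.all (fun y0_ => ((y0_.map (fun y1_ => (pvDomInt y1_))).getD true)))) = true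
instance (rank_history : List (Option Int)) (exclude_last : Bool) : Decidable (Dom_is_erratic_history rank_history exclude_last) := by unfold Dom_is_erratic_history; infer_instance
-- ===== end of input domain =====

-- B replaces A's window-of-3 index scan by a difference-sign sequence plus a count of
-- adjacent opposite-sign pairs (objective: alternative decomposition, same cost).

-- ===== PORT A =====
def is_erratic_history (rank_history : List (Option Int)) (exclude_last : Bool) : Bool :=
  let ranks0 := if exclude_last then PySem.List.slice rank_history none (some (-1)) else rank_history
  let ranks : List Int := ranks0.filterMap id
  if ranks.length < 3 then false
  else
    let reversals : Int :=
      ((PySem.List.pyRange 1 ((ranks.length : Int) - 1) 1).map (fun i =>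
        if (PySem.List.pyGetD ranks i 0 > PySem.List.pyGetD ranks (i - 1) 0 ∧
            PySem.List.pyGetD ranks i 0 > PySem.List.pyGetD ranks (i + 1) 0) ∨
           (PySem.List.pyGetD ranks i 0 < PySem.List.pyGetD ranks (i - 1) 0 ∧
            PySem.List.pyGetD ranks i 0 < PySem.List.pyGetD ranks (i + 1) 0) then (1 : Int) else 0)).sum
    decide (reversals ≥ 5)

-- ===== PORT B =====
-- sign of the step a → b : +1 rising, -1 falling, 0 flat
def pvSign (a b : Int) : Int := if b > a then 1 else if b < a then -1 else 0

def is_erratic_history_alt (rank_history : List (Option Int)) (exclude_last : Bool) : Bool :=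
  let ranks0 := if exclude_last then PySem.List.slice rank_history none (some (-1)) else rank_history
  let ranks : List Int := ranks0.filterMap id
  let signs : List Int := (ranks.zip ranks.tail).map (fun p => pvSign p.1 p.2)
  let flips : Nat := (signs.zip signs.tail).countP (fun p => decide (p.1 * p.2 < 0))
  decide ((flips : Int) ≥ 5)

-- ===== PRECONDITION & SPEC =====
def Spec_is_erratic_history (rank_history : List (Option Int)) (exclude_last : Bool) (out : Bool) : Prop := out = is_erratic_history_alt rank_history exclude_last
instance (rank_history : List (Option Int)) (exclude_last : Bool) (out : Bool) : Decidable (Spec_is_erratic_history rank_history exclude_last out) := by unfold Spec_is_erratic_history; infer_instance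

-- ===== CLAIM (what is proved, stated in full; the proofs are below) =====
def Claim_equal_is_erratic_history : Prop := ∀ (rank_history : List (Option Int)) (exclude_last : Bool), Dom_is_erratic_history rank_history exclude_last → Spec_is_erratic_history rank_history exclude_last (is_erratic_history rank_history exclude_last)

-- ===== LEMMAS AND PROOFS =====

-- structural count of strict local extrema (the common value both programs compute)
def countRev : List Int → Nat
  | a :: b :: c :: t => (if (b > a ∧ b > c) ∨ (b < a ∧ b < c) then 1 else 0) + countRev (b :: c :: t)
  | _ => 0

-- a triple is a strict peak/valley iff its two step signs are nonzero and opposite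
lemma sign_flip_iff (a b c : Int) :
    (pvSign a b * pvSign b c < 0) ↔ ((b > a ∧ b > c) ∨ (b < a ∧ b < c)) := by
  unfold pvSign
  split_ifs <;> constructor <;> intro h <;> omega

-- A's Nat-indexed window sum equals countRev
lemma sumWinNat (xs : List Int) :
    ((List.range (xs.length - 2)).map (fun k =>
      if (xs.getD (k+1) 0 > xs.getD k 0 ∧ xs.getD (k+1) 0 > xs.getD (k+2) 0) ∨
         (xs.getD (k+1) 0 < xs.getD k 0 ∧ xs.getD (k+1) 0 < xs.getD (k+2) 0) then (1 : Int) else 0)).sum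
    = (countRev xs : Int) := by
  match xs with
  | [] => simp [countRev]
  | [a] => simp [countRev]
  | [a, b] => simp [countRev]
  | a :: b :: c :: t =>
    have ih := sumWinNat (b :: c :: t)
    have hlen : (a :: b :: c :: t).length - 2 = ((b :: c :: t).length - 2) + 1 := by
      simp
    rw [hlen, List.range_succ_eq_map, List.map_cons, List.map_map, List.sum_cons]
    have hmap : ((List.range ((b :: c :: t).length - 2)).map
        ((fun k =>
          if ((a :: b :: c :: t).getD (k+1) 0 > (a :: b :: c :: t).getD k 0 ∧
              (a :: b :: c :: t).getD (k+1) 0 > (a :: b :: c :: t).getD (k+2) 0) ∨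
             ((a :: b :: c :: t).getD (k+1) 0 < (a :: b :: c :: t).getD k 0 ∧
              (a :: b :: c :: t).getD (k+1) 0 < (a :: b :: c :: t).getD (k+2) 0) then (1 : Int) else 0)
          ∘ Nat.succ)) =
        ((List.range ((b :: c :: t).length - 2)).map (fun k =>
          if ((b :: c :: t).getD (k+1) 0 > (b :: c :: t).getD k 0 ∧
              (b :: c :: t).getD (k+1) 0 > (b :: c :: t).getD (k+2) 0) ∨
             ((b :: c :: t).getD (k+1) 0 < (b :: c :: t).getD k 0 ∧
              (b :: c :: t).getD (k+1) 0 < (b :: c :: t).getD (k+2) 0) then (1 : Int) else 0)) := by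
      apply List.map_congr_left
      intro k _
      simp [Function.comp, List.getD]
    rw [hmap, ih]
    have e0 : (a :: b :: c :: t).getD 0 0 = a := rfl
    have e1 : (a :: b :: c :: t).getD (0+1) 0 = b := rfl
    have e2 : (a :: b :: c :: t).getD (0+2) 0 = c := rfl
    rw [e0, e1, e2]
    simp only [countRev]
    split_ifs <;> simp

-- B's flip count equals countRev
lemma flipsEq (xs : List Int) :
    (let signs : List Int := (xs.zip xs.tail).map (fun p => pvSign p.1 p.2)
     (signs.zip signs.tail).countP (fun p => decide (p.1 * p.2 < 0))) = countRev xs := by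
  match xs with
  | [] => simp [countRev]
  | [a] => simp [countRev]
  | [a, b] => simp [countRev]
  | a :: b :: c :: t =>
    have ih := flipsEq (b :: c :: t)
    simp only [List.tail_cons, List.zip_cons_cons, List.map_cons, List.countP_cons] at ih ⊢
    rw [ih]
    by_cases h : (b > a ∧ b > c) ∨ (b < a ∧ b < c)
    · simp [countRev, h, (sign_flip_iff a b c).2 h, Nat.add_comm]
    · have : ¬ (pvSign a b * pvSign b c < 0) := fun hc => h ((sign_flip_iff a b c).1 hc)
      simp [countRev, h, this]

-- the common body on the filtered rank list
lemma core_eq (ranks : List Int) :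
    (if ranks.length < 3 then false
     else
       decide ((((PySem.List.pyRange 1 ((ranks.length : Int) - 1) 1).map (fun i =>
        if (PySem.List.pyGetD ranks i 0 > PySem.List.pyGetD ranks (i - 1) 0 ∧
            PySem.List.pyGetD ranks i 0 > PySem.List.pyGetD ranks (i + 1) 0) ∨
           (PySem.List.pyGetD ranks i 0 < PySem.List.pyGetD ranks (i - 1) 0 ∧
            PySem.List.pyGetD ranks i 0 < PySem.List.pyGetD ranks (i + 1) 0) then (1 : Int) else 0)).sum) ≥ 5))
    = (let signs : List Int := (ranks.zip ranks.tail).map (fun p => pvSign p.1 p.2)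
       let flips : Nat := (signs.zip signs.tail).countP (fun p => decide (p.1 * p.2 < 0))
       decide ((flips : Int) ≥ 5)) := by
  simp only []
  rw [flipsEq ranks]
  by_cases h3 : ranks.length < 3
  · -- short lists: countRev = 0, both sides false
    have hz : countRev ranks = 0 := by
      match ranks, h3 with
      | [], _ => rfl
      | [a], _ => rfl
      | [a, b], _ => rfl
      | a :: b :: c :: t, h => simp at h; omega
    simp [h3, hz]
  · -- rewrite A's pyRange sum into the Nat-indexed window sum
    have htn : ((ranks.length : Int) - 1 - 1).toNat = ranks.length - 2 := by omega
    rw [if_neg h3, PySem.List.pyRange_one, htn, List.map_map]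
    have hmap : ((List.range (ranks.length - 2)).map
        ((fun i =>
          if (PySem.List.pyGetD ranks i 0 > PySem.List.pyGetD ranks (i - 1) 0 ∧
              PySem.List.pyGetD ranks i 0 > PySem.List.pyGetD ranks (i + 1) 0) ∨
             (PySem.List.pyGetD ranks i 0 < PySem.List.pyGetD ranks (i - 1) 0 ∧
              PySem.List.pyGetD ranks i 0 < PySem.List.pyGetD ranks (i + 1) 0) then (1 : Int) else 0)
          ∘ (fun k : Nat => (1 : Int) + (k : Int)))) =
        ((List.range (ranks.length - 2)).map (fun k =>
          if (ranks.getD (k+1) 0 > ranks.getD k 0 ∧ ranks.getD (k+1) 0 > ranks.getD (k+2) 0) ∨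
             (ranks.getD (k+1) 0 < ranks.getD k 0 ∧ ranks.getD (k+1) 0 < ranks.getD (k+2) 0) then (1 : Int) else 0)) := by
      apply List.map_congr_left
      intro k _
      have e2 : (1 : Int) + k = ((k + 1 : Nat) : Int) := by push_cast; omega
      have e1 : ((k + 1 : Nat) : Int) - 1 = ((k : Nat) : Int) := by push_cast; omega
      have e3 : ((k + 1 : Nat) : Int) + 1 = ((k + 2 : Nat) : Int) := by push_cast; omega
      simp only [Function.comp, e2, e1, e3, PySem.List.pyGetD_natCast]
    rw [hmap, sumWinNat ranks]

-- ===== VERDICT (by name: the statement is the Claim_ definition above) =====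
theorem is_erratic_history_spec : Claim_equal_is_erratic_history := by
  intro rh ex _
  unfold Spec_is_erratic_history is_erratic_history is_erratic_history_alt
  exact core_eq _
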